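-- pv_equiv track=rewrite | github.com/haolunc/ARC-RL | reference_solutions/solutions/e3497940.py | transform
-- ===== SOURCE A (Python) =====
-- def transform(grid):
--
--     h = len(grid)
--     w = len(grid[0])
--     centre = w // 2
--     out_w = centre
--
--     out = [row[:out_w] for row in grid]
--
--     for i in range(h):
--         for c in range(centre + 1, w):
--             val = grid[i][c]
--             if val != 0:
--                 target = w - 1 - c
--                 if 0 <= target < out_w:
--                     out[i][target] = val
--     return out
-- ===== SOURCE B (Python) =====
-- def _peel(seg):
--     if len(seg) < 3:
--         return seg[:len(seg) // 2]
--     first, *middle, last = seg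
--     return [last if last != 0 else first] + _peel(middle)
--
--
-- def transform(grid):
--     w = len(grid[0])
--     return [_peel(row[:w]) for row in grid]
-- ===== Notes on version B (the rewrite author's own statement) =====
-- stated objective: alternative
-- what changed: A copies the left half and then runs nested index loops writing nonzero right-half cells into mirrored slots of a mutable output; B builds each output row by a structural recursion that peels the first and last element of the (width-truncated) row, emits the last if nonzero else the first, and recurses on the middle — no index arithmetic or in-place writes, at the cost of re-slicing the middle each step.
-- outside the precondition, e.g. on transform([[1, 2], [5]]): A returns [[1], [5]], B returns [[1], []]
import Mathlib
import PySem

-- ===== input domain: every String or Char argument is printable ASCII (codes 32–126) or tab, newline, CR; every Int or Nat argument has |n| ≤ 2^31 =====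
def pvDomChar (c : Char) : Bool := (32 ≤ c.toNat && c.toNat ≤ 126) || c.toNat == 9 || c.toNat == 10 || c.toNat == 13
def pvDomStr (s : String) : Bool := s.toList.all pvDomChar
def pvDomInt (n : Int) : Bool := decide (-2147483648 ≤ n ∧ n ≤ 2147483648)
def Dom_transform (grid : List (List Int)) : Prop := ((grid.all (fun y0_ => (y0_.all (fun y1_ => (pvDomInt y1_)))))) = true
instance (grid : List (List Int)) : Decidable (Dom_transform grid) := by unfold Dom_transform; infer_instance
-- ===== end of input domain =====

-- B replaces A's copy-left-half-then-overwrite nested index loops by a structural recursion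
-- that peels first/last pairs off each width-truncated row (alternative decomposition).

-- ===== PORT A =====
def transform (grid : List (List Int)) : List (List Int) :=
  let h : Int := (grid.length : Int)
  let w : Int := (((PySem.List.pyGetD grid 0 []).length : Nat) : Int)   -- grid[0]: Pre_ excludes the empty grid
  let centre : Int := PySem.Int.floordiv w 2
  let out_w : Int := centre
  let out0 := grid.map (fun row => PySem.List.slice row none (some out_w))
  (PySem.List.pyRange 0 h 1).foldl (fun out i =>
    (PySem.List.pyRange (centre + 1) w 1).foldl (fun out c =>
      let val := PySem.List.pyGetD (PySem.List.pyGetD grid i []) c 0   -- grid[i][c]: Pre_ excludes the short rows this reaches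
      if val ≠ 0 then
        let target := w - 1 - c
        if 0 ≤ target ∧ target < out_w then
          PySem.List.pySetD out i (PySem.List.pySetD (PySem.List.pyGetD out i []) target val)
        else out
      else out) out) out0

-- ===== PORT B =====
-- _peel(seg): 'first, *middle, last = seg' ports as headI / tail.dropLast / getLast!
def pvPeel (seg : List Int) : List Int :=
  if h : seg.length < 3 then
    PySem.List.slice seg none (some (((seg.length / 2 : Nat) : Int)))   -- seg[:len(seg)//2]
  else
    (if seg.getLast! ≠ 0 then seg.getLast! else seg.headI) :: pvPeel seg.tail.dropLast
termination_by seg.length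
decreasing_by simp only [List.length_dropLast, List.length_tail]; omega

def transform_alt (grid : List (List Int)) : List (List Int) :=
  let w : Int := (((PySem.List.pyGetD grid 0 []).length : Nat) : Int)
  grid.map (fun row => pvPeel (PySem.List.slice row none (some w)))   -- _peel(row[:w])

-- ===== PRECONDITION & SPEC =====
-- Pre_ excludes the empty grid (A raises IndexError at grid[0]) and ragged grids with a row
-- shorter than the first row's width w: for w ≥ 3 A raises IndexError reading grid[i][c] there,
-- and for w = 2 with a length-1 row the corner is a defensible tie — A's truncated copy [row[0]]
-- and B's empty peeled row are both reasonable for a row shorter than the declared width.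
def Pre_transform (grid : List (List Int)) : Prop :=
  grid ≠ [] ∧ ∀ row ∈ grid,
    grid.headI.length ≤ row.length ∨ (grid.headI.length ≤ 2 ∧ row.length ≠ 1)
instance (grid : List (List Int)) : Decidable (Pre_transform grid) := by
  unfold Pre_transform; infer_instance
def pvWitness_transform : List (List Int) := [[1, 2, 0, 4], [0, 5, 6, 0]]

def Spec_transform (grid : List (List Int)) (out : List (List Int)) : Prop := out = transform_alt grid
instance (grid : List (List Int)) (out : List (List Int)) : Decidable (Spec_transform grid out) := by unfold Spec_transform; infer_instance

-- ===== CLAIM (what is proved, stated in full; the proofs are below) =====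
def Claim_equal_transform : Prop := ∀ (grid : List (List Int)), Dom_transform grid → Pre_transform grid → Spec_transform grid (transform grid)

-- ===== LEMMAS AND PROOFS =====

-- the two width parameters read off the grid
def pvWn (grid : List (List Int)) : Nat := (PySem.List.pyGetD grid 0 []).length
def pvM (grid : List (List Int)) : Nat := pvWn grid / 2

-- A's inner-loop body on the 2D output (one write out[i][target] = val)
def pvInner (grid : List (List Int)) (wn m : Nat) (i : Int)
    (out : List (List Int)) (c : Int) : List (List Int) :=
  let val := PySem.List.pyGetD (PySem.List.pyGetD grid i []) c 0
  if val ≠ 0 then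
    if 0 ≤ (wn : Int) - 1 - c ∧ (wn : Int) - 1 - c < (m : Int) then
      PySem.List.pySetD out i (PySem.List.pySetD (PySem.List.pyGetD out i []) ((wn : Int) - 1 - c) val)
    else out
  else out

-- the same body acting on the single affected row
def pvRstep (row : List Int) (wn m : Nat) (r : List Int) (c : Int) : List Int :=
  let val := PySem.List.pyGetD row c 0
  if val ≠ 0 then
    if 0 ≤ (wn : Int) - 1 - c ∧ (wn : Int) - 1 - c < (m : Int) then
      PySem.List.pySetD r ((wn : Int) - 1 - c) val
    else r
  else r

-- pointwise description of B's peel: output cell t mirrors source len-1-t when that source is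
-- strictly right of centre (len ≥ 2t+3) and nonzero, else keeps cell t
def pvSpecRow (seg : List Int) : List Int :=
  (List.range (seg.length / 2)).map (fun t =>
    if 2 * t + 3 ≤ seg.length ∧ seg.getD (seg.length - 1 - t) 0 ≠ 0
    then seg.getD (seg.length - 1 - t) 0 else seg.getD t 0)

lemma pvFloordiv_two (n : Nat) : PySem.Int.floordiv (n : Int) 2 = ((n / 2 : Nat) : Int) := by
  exact_mod_cast PySem.Int.floordiv_natCast n 2

lemma transform_eq (grid : List (List Int)) :
    transform grid =
      (PySem.List.pyRange 0 (grid.length : Int) 1).foldl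
        (fun out i =>
          (PySem.List.pyRange ((pvM grid : Int) + 1) (pvWn grid : Int) 1).foldl
            (pvInner grid (pvWn grid) (pvM grid) i) out)
        (grid.map (fun row => row.take (pvM grid))) := by
  simp only [transform, pvWn, pvM, pvFloordiv_two, PySem.List.slice_to_natCast]
  rfl

lemma transform_alt_eq (grid : List (List Int)) :
    transform_alt grid = grid.map (fun row => pvPeel (row.take (pvWn grid))) := by
  simp only [transform_alt, pvWn, PySem.List.slice_to_natCast]

lemma pvRstep_len (row : List Int) (wn m : Nat) (r : List Int) (c : Int) :
    (pvRstep row wn m r c).length = r.length := by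
  unfold pvRstep
  dsimp only
  by_cases h1 : PySem.List.pyGetD row c 0 = 0
  · rw [if_neg (not_not_intro h1)]
  · rw [if_pos h1]
    by_cases h2 : (0 ≤ (wn : Int) - 1 - c ∧ (wn : Int) - 1 - c < (m : Int))
    · rw [if_pos h2, PySem.List.length_pySetD]
    · rw [if_neg h2]

lemma pvFold_len (row : List Int) (wn m : Nat) :
    ∀ (cs : List Int) (r : List Int),
      (cs.foldl (pvRstep row wn m) r).length = r.length := by
  intro cs
  induction cs with
  | nil => intro r; rfl
  | cons c cs ih => intro r; simp only [List.foldl_cons]; rw [ih, pvRstep_len]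

lemma pvInner_single (grid : List (List Int)) (wn m : Nat) (i : Nat)
    (out : List (List Int)) (c : Int) (hi : i < out.length) :
    pvInner grid wn m (i : Int) out c
      = out.set i (pvRstep (PySem.List.pyGetD grid (i : Int) []) wn m (out.getD i []) c) := by
  unfold pvInner pvRstep
  simp only [PySem.List.pySetD_natCast, PySem.List.pyGetD_natCast]
  split_ifs <;>
    simp [List.getElem?_eq_getElem hi, List.set_getElem_self]

lemma pvInner_loc (grid : List (List Int)) (wn m : Nat) (i : Nat) :
    ∀ (cs : List Int) (out : List (List Int)), i < out.length →
      cs.foldl (pvInner grid wn m (i : Int)) out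
        = out.set i (cs.foldl (pvRstep (PySem.List.pyGetD grid (i : Int) []) wn m) (out.getD i [])) := by
  intro cs
  induction cs with
  | nil =>
    intro out hi
    simp [List.getElem?_eq_getElem hi, List.set_getElem_self]
  | cons c cs ih =>
    intro out hi
    simp only [List.foldl_cons]
    rw [pvInner_single grid wn m i out c hi, ih _ (by simpa using hi)]
    have h2 : i < (out.set i (pvRstep (PySem.List.pyGetD grid (i : Int) []) wn m (out.getD i []) c)).length := by
      simpa using hi
    rw [List.getD_eq_getElem _ _ h2, List.getElem_set_self, List.set_set]

lemma pvOuter_loc (G : Nat → List Int → List Int)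
    (step : List (List Int) → Int → List (List Int))
    (hstep : ∀ (out : List (List Int)) (k : Nat), k < out.length →
      step out (k : Int) = out.set k (G k (out.getD k []))) :
    ∀ (suf pre : List (List Int)),
      (PySem.List.pyRange (pre.length : Int) ((pre.length : Int) + (suf.length : Int)) 1).foldl
          step (pre ++ suf)
        = pre ++ (List.range suf.length).map (fun k => G (pre.length + k) (suf.getD k [])) := by
  intro suf
  induction suf with
  | nil =>
    intro pre
    rw [PySem.List.pyRange_one_eq_nil (by simp)]
    simp
  | cons r suf ih =>
    intro pre
    rw [PySem.List.pyRange_one_cons (by push_cast [List.length_cons]; omega)]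
    simp only [List.foldl_cons]
    have hlen : pre.length < (pre ++ r :: suf).length := by simp
    rw [hstep _ _ hlen]
    have hget : (pre ++ r :: suf).getD pre.length [] = r := by
      simp [List.getD_eq_getElem?_getD]
    have hset : (pre ++ r :: suf).set pre.length (G pre.length r)
        = (pre ++ [G pre.length r]) ++ suf := by
      simp
    rw [hget, hset]
    have harg1 : ((pre.length : Int) + 1) = (((pre ++ [G pre.length r]).length : Nat) : Int) := by
      simp
    have harg2 : ((pre.length : Int) + ((r :: suf).length : Int))
        = (((pre ++ [G pre.length r]).length : Nat) : Int) + ((suf.length : Nat) : Int) := by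
      simp
      ring
    rw [harg1, harg2, ih]
    simp only [List.range_succ_eq_map, List.map_cons, List.map_map, List.append_assoc,
      List.cons_append, List.nil_append, List.getD_cons_zero, List.length_append,
      List.length_cons, List.length_nil]
    congr 1
    congr 1
    apply List.map_congr_left
    intro k _
    simp only [Function.comp_apply, List.getD_cons_succ]
    have h3 : pre.length + 1 + k = pre.length + (k + 1) := by omega
    rw [h3]

lemma pvOuter_loc0 (G : Nat → List Int → List Int)
    (step : List (List Int) → Int → List (List Int))
    (hstep : ∀ (out : List (List Int)) (k : Nat), k < out.length →
      step out (k : Int) = out.set k (G k (out.getD k [])))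
    (suf : List (List Int)) :
    (PySem.List.pyRange 0 (suf.length : Int) 1).foldl step suf
      = (List.range suf.length).map (fun k => G k (suf.getD k [])) := by
  have h := pvOuter_loc G step hstep suf []
  simpa using h

-- pointwise description of A's per-row fold: position t holds the value pulled from the unique
-- mirrored source column c = wn-1-t when that c lies in the processed range with nonzero value
lemma pvP (row : List Int) (wn m : Nat) (hm : wn ≤ 2 * m + 1) (hrow : wn ≤ row.length) :
    ∀ (n a : Nat) (r : List Int), r.length = m → m + 1 ≤ a → a + n ≤ wn →
      ∀ t : Nat, t < m →
      (((List.range n).map (fun (k : Nat) => ((a : Nat) : Int) + (k : Int))).foldl (pvRstep row wn m) r).getD t 0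
        = if (wn - 1 - t < a + n ∧ a ≤ wn - 1 - t ∧ row.getD (wn - 1 - t) 0 ≠ 0)
          then row.getD (wn - 1 - t) 0 else r.getD t 0 := by
  intro n
  induction n with
  | zero =>
    intro a r hr ha hb t ht
    simp only [List.range_zero, List.map_nil, List.foldl_nil]
    rw [if_neg (by omega)]
  | succ n ih =>
    intro a r hr ha hb t ht
    rw [List.range_succ, List.map_append, List.foldl_append]
    simp only [List.map_cons, List.map_nil, List.foldl_cons, List.foldl_nil]
    set r' := ((List.range n).map (fun (k : Nat) => ((a : Nat) : Int) + (k : Int))).foldl (pvRstep row wn m) r with hr'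
    have hr'len : r'.length = m := by rw [hr', pvFold_len, hr]
    have hih := ih a r hr ha (by omega) t ht
    have hcw : a + n < wn := by omega
    have hclt : a + n < row.length := by omega
    have hcast : ((a : Nat) : Int) + ((n : Nat) : Int) = ((a + n : Nat) : Int) := by push_cast; ring
    rw [hcast]
    unfold pvRstep
    simp only [PySem.List.pyGetD_natCast]
    rw [List.getD_eq_getElem row 0 hclt]
    by_cases hv : row[a + n] = 0
    · simp only [hv, ne_eq, not_true_eq_false, if_false]
      rw [hih]
      by_cases hq : wn - 1 - t = a + n
      · have hz : row.getD (wn - 1 - t) 0 = 0 := by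
          rw [hq, List.getD_eq_getElem row 0 hclt]; exact hv
        rw [if_neg (by omega), if_neg (by rintro ⟨-, -, h3⟩; exact h3 hz)]
      · have hiff : (wn - 1 - t < a + (n + 1) ∧ a ≤ wn - 1 - t ∧ row.getD (wn - 1 - t) 0 ≠ 0)
            ↔ (wn - 1 - t < a + n ∧ a ≤ wn - 1 - t ∧ row.getD (wn - 1 - t) 0 ≠ 0) := by
          constructor <;> rintro ⟨u1, u2, u3⟩ <;> exact ⟨by omega, u2, u3⟩
        rw [if_congr hiff rfl rfl]
    · rw [if_pos hv]
      have hguard : (0 : Int) ≤ (wn : Int) - 1 - ((a + n : Nat) : Int)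
          ∧ (wn : Int) - 1 - ((a + n : Nat) : Int) < (m : Int) := by
        constructor <;> push_cast <;> omega
      rw [if_pos hguard]
      have htn : (wn : Int) - 1 - ((a + n : Nat) : Int) = ((wn - 1 - (a + n) : Nat) : Int) := by
        push_cast; omega
      rw [htn, PySem.List.pySetD_natCast]
      have hj : wn - 1 - (a + n) < m := by omega
      by_cases hq : t = wn - 1 - (a + n)
      · subst hq
        have hset : wn - 1 - (a + n) < (r'.set (wn - 1 - (a + n)) row[a + n]).length := by
          simp [hr'len]; omega
        have h1 : wn - 1 - (wn - 1 - (a + n)) = a + n := by omega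
        rw [List.getD_eq_getElem _ 0 hset, List.getElem_set_self,
          if_pos ⟨by omega, by omega, by rw [h1, List.getD_eq_getElem row 0 hclt]; exact hv⟩,
          h1, List.getD_eq_getElem row 0 hclt]
      · have hset : t < (r'.set (wn - 1 - (a + n)) row[a + n]).length := by
          simp [hr'len]; omega
        rw [List.getD_eq_getElem _ 0 hset,
          List.getElem_set_ne (by omega), ← List.getD_eq_getElem r' 0 (by omega), hih]
        have hiff : (wn - 1 - t < a + (n + 1) ∧ a ≤ wn - 1 - t ∧ row.getD (wn - 1 - t) 0 ≠ 0)
            ↔ (wn - 1 - t < a + n ∧ a ≤ wn - 1 - t ∧ row.getD (wn - 1 - t) 0 ≠ 0) := by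
          constructor <;> rintro ⟨u1, u2, u3⟩ <;> exact ⟨by omega, u2, u3⟩
        rw [if_congr hiff rfl rfl]

lemma pvTake_map (xs : List Int) (k : Nat) (h : k ≤ xs.length) :
    xs.take k = (List.range k).map (fun t => xs.getD t 0) := by
  apply List.ext_getElem
  · simp; omega
  intro i h1 h2
  simp only [List.getElem_map, List.getElem_range, List.getElem_take]
  rw [List.getD_eq_getElem _ _ (by simp at h1; omega)]

-- B's peel computes the pointwise description, by induction along pvPeel's recursion
lemma pvPeel_eq (seg : List Int) : pvPeel seg = pvSpecRow seg := by
  induction seg using pvPeel.induct with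
  | case1 seg h =>
    rw [pvPeel, dif_pos h, PySem.List.slice_to_natCast]
    unfold pvSpecRow
    rw [pvTake_map seg _ (by omega)]
    apply List.map_congr_left
    intro t ht
    rw [if_neg (by rintro ⟨u1, -⟩; omega)]
  | case2 seg h ih =>
    rw [pvPeel, dif_neg h]
    have hne : seg ≠ [] := by intro e; subst e; simp at h
    obtain ⟨a, tail, rfl⟩ : ∃ a tail, seg = a :: tail := by
      cases seg with | nil => exact absurd rfl hne | cons a t => exact ⟨a, t, rfl⟩
    have htne : tail ≠ [] := by intro e; subst e; simp at h
    have hdl : tail = tail.dropLast ++ [tail.getLast htne] := (List.dropLast_append_getLast htne).symm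
    set mid := tail.dropLast with hmid
    have hlen : (a :: tail).length = mid.length + 2 := by
      simp only [List.length_cons, hmid, List.length_dropLast]
      have : tail.length ≥ 1 := List.length_pos_of_ne_nil htne
      omega
    have hL : (a :: tail).getLast! = tail.getLast htne := by
      rw [List.getLast!_eq_getLast?_getD, List.getLast?_eq_some_getLast (by simp)]
      simp [List.getLast_cons htne]
    set L := tail.getLast htne with hLdef
    have hmid2 : (a :: tail).tail.dropLast = mid := by simp [hmid]
    rw [hmid2] at ih ⊢
    have hseg : a :: tail = a :: (mid ++ [L]) := by rw [hmid]; exact congrArg (a :: ·) hdl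
    -- RHS
    unfold pvSpecRow
    rw [hlen]
    have hdiv : (mid.length + 2) / 2 = mid.length / 2 + 1 := by omega
    rw [hdiv, List.range_succ_eq_map, List.map_cons, List.map_map]
    congr 1
    · -- head
      have hidx : mid.length + 2 - 1 - 0 = mid.length + 1 := by omega
      have hget1 : (a :: tail).getD (mid.length + 1) 0 = L := by
        rw [hseg]
        rw [List.getD_cons_succ]
        have : (mid ++ [L]).getD mid.length 0 = L := by
          rw [List.getD_eq_getElem _ _ (by simp)]
          simp
        exact this
      have hget0 : (a :: tail).getD 0 0 = a := rfl
      rw [hidx, hget1, hget0, hL, List.headI_cons]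
      by_cases hz : L = 0
      · rw [if_neg (by simp [hz]), if_neg (by rintro ⟨-, u⟩; exact u hz)]
      · rw [if_pos hz, if_pos ⟨by omega, hz⟩]
    · -- tail
      rw [ih]
      unfold pvSpecRow
      apply List.map_congr_left
      intro t ht
      rw [List.mem_range] at ht
      have htm : t < mid.length := by omega
      simp only [Function.comp_apply, Nat.succ_eq_add_one]
      have hidx2 : mid.length + 2 - 1 - (t + 1) = mid.length - t := by omega
      have hgetm : (a :: tail).getD (mid.length - t) 0 = mid.getD (mid.length - 1 - t) 0 := by
        rw [hseg]
        have h1 : mid.length - t = (mid.length - 1 - t) + 1 := by omega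
        rw [h1, List.getD_cons_succ, List.getD_append _ _ _ _ (by omega)]
      have hgett : (a :: tail).getD (t + 1) 0 = mid.getD t 0 := by
        rw [hseg, List.getD_cons_succ, List.getD_append _ _ _ _ htm]
      rw [hidx2, hgetm, hgett]
      have hiff : (2 * (t + 1) + 3 ≤ mid.length + 2 ∧ mid.getD (mid.length - 1 - t) 0 ≠ 0)
          ↔ (2 * t + 3 ≤ mid.length ∧ mid.getD (mid.length - 1 - t) 0 ≠ 0) := by
        constructor <;> rintro ⟨u1, u2⟩ <;> exact ⟨by omega, u2⟩
      rw [if_congr hiff rfl rfl]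

-- A's per-row fold computes B's peel on the width-truncated row
lemma pvPerRow (row : List Int) (wn m : Nat) (hm : m = wn / 2)
    (h : wn ≤ row.length ∨ (wn ≤ 2 ∧ row.length ≠ 1)) :
    (PySem.List.pyRange ((m : Int) + 1) (wn : Int) 1).foldl (pvRstep row wn m) (row.take m)
      = pvPeel (row.take wn) := by
  by_cases hA : wn ≤ row.length
  · by_cases hw : wn < 3
    · -- loop range empty, peel hits its base case
      rw [PySem.List.pyRange_one_eq_nil (by omega), List.foldl_nil]
      have hlt : (row.take wn).length = wn := by simp; omega
      rw [pvPeel, dif_pos (by omega : (row.take wn).length < 3), PySem.List.slice_to_natCast,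
        hlt, List.take_take]
      have hmin : min (wn / 2) wn = m := by omega
      rw [hmin]
    · rw [pvPeel_eq]
      have hmw : m + 1 ≤ wn := by omega
      have hslen : (row.take wn).length = wn := by simp; omega
      have hsg : ∀ i, i < wn → (row.take wn).getD i 0 = row.getD i 0 := by
        intro i hi
        rw [List.getD_eq_getElem _ _ (by omega), List.getElem_take,
          List.getD_eq_getElem _ _ (by omega)]
      have hcast : ((m : Int) + 1) = ((m + 1 : Nat) : Int) := by push_cast; ring
      rw [PySem.List.pyRange_one, hcast]
      have hn : ((wn : Int) - ((m + 1 : Nat) : Int)).toNat = wn - (m + 1) := by omega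
      rw [hn]
      have hlen : (row.take m).length = m := by simp; omega
      apply List.ext_getElem
      · rw [pvFold_len]; simp [pvSpecRow, hslen]; omega
      intro t h1 h2
      have ht : t < m := by rw [pvFold_len, hlen] at h1; exact h1
      have hP := pvP row wn m (by omega) hA (wn - (m + 1)) (m + 1) (row.take m)
        hlen le_rfl (by omega) t ht
      rw [← List.getD_eq_getElem _ 0 h1, hP]
      simp only [pvSpecRow, List.getElem_map, List.getElem_range, hslen]
      rw [hsg (wn - 1 - t) (by omega), hsg t (by omega)]
      have hlg : (row.take m).getD t 0 = row.getD t 0 := by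
        rw [List.getD_eq_getElem _ _ (by omega), List.getElem_take,
          List.getD_eq_getElem _ _ (by omega)]
      rw [hlg]
      have hiff : (wn - 1 - t < m + 1 + (wn - (m + 1)) ∧ m + 1 ≤ wn - 1 - t ∧ row.getD (wn - 1 - t) 0 ≠ 0)
          ↔ (2 * t + 3 ≤ wn ∧ row.getD (wn - 1 - t) 0 ≠ 0) := by
        constructor
        · rintro ⟨u1, u2, u3⟩; exact ⟨by omega, u3⟩
        · rintro ⟨u1, u2⟩; exact ⟨by omega, by omega, u2⟩
      rw [if_congr hiff rfl rfl]
  · -- a row shorter than the width: Pre_ forces it to be empty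
    have hrow : row = [] := by
      rcases h with h | ⟨h1, h2⟩
      · omega
      · exact List.eq_nil_of_length_eq_zero (by omega)
    subst hrow
    have hflen : ((PySem.List.pyRange ((m : Int) + 1) (wn : Int) 1).foldl
        (pvRstep [] wn m) (List.take m [])).length = 0 := by
      rw [pvFold_len]; simp
    rw [List.eq_nil_of_length_eq_zero hflen, pvPeel, dif_pos (by simp),
      PySem.List.slice_to_natCast]
    simp

lemma pvWn_headI (grid : List (List Int)) (h : grid ≠ []) :
    pvWn grid = grid.headI.length := by
  cases grid with
  | nil => exact absurd rfl h
  | cons g gs => simp [pvWn, PySem.List.pyGetD_zero_cons]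

-- ===== VERDICT (by name: the statement is the Claim_ definition above) =====
theorem transform_spec : Claim_equal_transform := by
  unfold Claim_equal_transform
  intro grid _ hpre
  unfold Spec_transform
  obtain ⟨hne, hrows⟩ := hpre
  rw [transform_eq, transform_alt_eq]
  have hlenmap : (grid.length : Int)
      = ((grid.map (fun row => row.take (pvM grid))).length : Int) := by simp
  rw [hlenmap]
  rw [pvOuter_loc0
    (fun k r => (PySem.List.pyRange ((pvM grid : Int) + 1) (pvWn grid : Int) 1).foldl
      (pvRstep (PySem.List.pyGetD grid (k : Int) []) (pvWn grid) (pvM grid)) r)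
    _ (fun out k hk => pvInner_loc grid (pvWn grid) (pvM grid) k _ out hk)]
  apply List.ext_getElem
  · simp
  intro k h1 h2
  have hk : k < grid.length := by simpa using h1
  simp only [List.getElem_map, List.getElem_range]
  have hgk : PySem.List.pyGetD grid (k : Int) [] = grid[k] := by
    rw [PySem.List.pyGetD_natCast, List.getD_eq_getElem _ _ hk]
  have hmk : (grid.map (fun row => row.take (pvM grid))).getD k [] = grid[k].take (pvM grid) := by
    rw [List.getD_eq_getElem _ _ (by simpa using hk), List.getElem_map]
  rw [hgk, hmk]
  apply pvPerRow
  · rfl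
  · have hh : pvWn grid = grid.headI.length := pvWn_headI grid hne
    rw [hh]; exact hrows _ (List.getElem_mem hk)
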